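-- pv_equiv track=rewrite | github.com/TomKloucek/advent-of-code | Advent-of-Code-2020/Day 6/solution.py | result_two
-- ===== SOURCE A (Python) =====
-- def result_two(pole):
--     true = 0
--     for answers in pole:
--         if len(answers) == 1:
--             true += len(answers[0])
--         else:
--             imp = set()
--             for cast in answers:
--                 for letter in cast:
--                     imp.add(letter)
--             for i in imp:
--                 if all(i in string for string in answers):
--                     true += 1
--     return true
-- ===== SOURCE B (Python) =====
-- def result_two(pole):
--     total = 0
--     for answers in pole:
--         if len(answers) == 1:
--             total += len(answers[0])
--         elif answers:
--             common = set(answers[0])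
--             for cast in answers[1:]:
--                 common &= set(cast)
--             total += len(common)
--     return total
-- ===== Notes on version B (the rewrite author's own statement) =====
-- stated objective: simpler
-- what changed: Replaces A's union-set build plus per-letter all(...) scan over every member with a direct fold of per-member character sets into their intersection, adding its size.
import Mathlib
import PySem

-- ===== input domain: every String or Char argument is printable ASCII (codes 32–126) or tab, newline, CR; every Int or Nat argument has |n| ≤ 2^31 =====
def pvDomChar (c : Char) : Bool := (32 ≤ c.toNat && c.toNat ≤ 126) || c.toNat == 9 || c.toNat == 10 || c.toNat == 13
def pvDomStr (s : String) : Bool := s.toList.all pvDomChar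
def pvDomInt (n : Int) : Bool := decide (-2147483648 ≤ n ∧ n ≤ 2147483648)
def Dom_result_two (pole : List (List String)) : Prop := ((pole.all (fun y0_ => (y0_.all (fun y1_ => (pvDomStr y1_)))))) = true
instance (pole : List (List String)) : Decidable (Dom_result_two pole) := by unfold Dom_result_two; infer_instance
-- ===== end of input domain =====

-- B folds the per-member character sets into their intersection instead of A's union-set
-- build followed by an all(...) scan; same return value, no side effects.
-- ===== PORT A =====
-- 'i in string' with i a single char is ported as membership in the string's char list (exact).
def result_two (pole : List (List String)) : Int :=
  pole.foldl (fun t answers =>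
    if answers.length = 1 then
      t + PySem.Str.len (PySem.List.pyGetD answers 0 "")
    else
      let imp : PySem.Set Char :=
        answers.foldl (fun s cast =>
          cast.toList.foldl (fun s letter => PySem.Set.add s letter) s) PySem.Set.empty
      imp.foldl (fun t i =>
        if answers.all (fun st => decide (i ∈ st.toList)) then t + 1 else t) t) 0

-- ===== PORT B =====
def result_two_alt (pole : List (List String)) : Int :=
  pole.foldl (fun t answers =>
    if answers.length = 1 then
      t + PySem.Str.len (PySem.List.pyGetD answers 0 "")
    else
      match answers with
      | [] => t
      | a0 :: rest =>
        let common : PySem.Set Char :=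
          rest.foldl (fun c cast => PySem.Set.inter c (PySem.Set.ofList cast.toList))
            (PySem.Set.ofList a0.toList)
        t + PySem.Set.len common) 0

-- ===== PRECONDITION & SPEC =====
def Spec_result_two (pole : List (List String)) (out : Int) : Prop := out = result_two_alt pole
instance (pole : List (List String)) (out : Int) : Decidable (Spec_result_two pole out) := by unfold Spec_result_two; infer_instance

-- ===== CLAIM (what is proved, stated in full; the proofs are below) =====
def Claim_equal_result_two : Prop := ∀ (pole : List (List String)), Dom_result_two pole → Spec_result_two pole (result_two pole)

-- ===== LEMMAS AND PROOFS =====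

-- ===== VERDICT (by name: the statement is the Claim_ definition above) =====
-- counting fold = countP
theorem fold_count (p : Char → Bool) : ∀ (l : List Char) (t : Int),
    l.foldl (fun t i => if p i then t + 1 else t) t = t + (l.countP p : Int) := by
  intro l; induction l with
  | nil => intro t; simp
  | cons x l ih =>
    intro t
    by_cases h : p x <;> simp [List.foldl, h, ih]; ring

-- membership in A's union set
theorem mem_union_fold (y : Char) : ∀ (answers : List String) (s : PySem.Set Char),
    (y ∈ answers.foldl (fun s cast =>
      cast.toList.foldl (fun s letter => PySem.Set.add s letter) s) s)
    ↔ (y ∈ s ∨ ∃ cast ∈ answers, y ∈ cast.toList) := by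
  intro answers; induction answers with
  | nil => simp
  | cons a rest ih =>
    intro s
    have h1 : (a.toList.foldl (fun s letter => PySem.Set.add s letter) s)
        = PySem.Set.update s a.toList := rfl
    simp only [List.foldl, ih, h1, PySem.Set.mem_update]
    constructor
    · rintro (⟨h | h⟩ | ⟨c, hc, hy⟩)
      · exact Or.inl h
      · exact Or.inr ⟨a, by simp, h⟩
      · exact Or.inr ⟨c, by simp [hc], hy⟩
    · rintro (h | ⟨c, hc, hy⟩)
      · exact Or.inl (Or.inl h)
      · rcases List.mem_cons.mp hc with rfl | hc
        · exact Or.inl (Or.inr hy)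
        · exact Or.inr ⟨c, hc, hy⟩

theorem nodup_union_fold : ∀ (answers : List String) (s : PySem.Set Char), s.Nodup →
    (answers.foldl (fun s cast =>
      cast.toList.foldl (fun s letter => PySem.Set.add s letter) s) s).Nodup := by
  intro answers; induction answers with
  | nil => intro s hs; simpa
  | cons a rest ih =>
    intro s hs
    exact ih _ (PySem.Set.nodup_update _ _ hs)

-- membership and nodup of B's intersection fold
theorem mem_inter_fold (y : Char) : ∀ (rest : List String) (c : PySem.Set Char),
    (y ∈ rest.foldl (fun c cast => PySem.Set.inter c (PySem.Set.ofList cast.toList)) c)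
    ↔ (y ∈ c ∧ ∀ cast ∈ rest, y ∈ cast.toList) := by
  intro rest; induction rest with
  | nil => simp
  | cons a rest ih =>
    intro c
    simp only [List.foldl, ih, PySem.Set.mem_inter, PySem.Set.mem_ofList]
    constructor
    · rintro ⟨⟨h1, h2⟩, h3⟩
      refine ⟨h1, ?_⟩
      intro cast hc; rcases List.mem_cons.mp hc with rfl | hc
      · exact h2
      · exact h3 cast hc
    · rintro ⟨h1, h2⟩
      exact ⟨⟨h1, h2 a (by simp)⟩, fun cast hc => h2 cast (by simp [hc])⟩

theorem nodup_inter_fold : ∀ (rest : List String) (c : PySem.Set Char), c.Nodup →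
    (rest.foldl (fun c cast => PySem.Set.inter c (PySem.Set.ofList cast.toList)) c).Nodup := by
  intro rest; induction rest with
  | nil => intro c hc; simpa
  | cons a rest ih =>
    intro c hc
    exact ih _ (PySem.Set.nodup_inter _ _ hc)

-- per-group step equality
theorem step_eq (t : Int) (answers : List String) :
    (if answers.length = 1 then
      t + PySem.Str.len (PySem.List.pyGetD answers 0 "")
    else
      let imp : PySem.Set Char :=
        answers.foldl (fun s cast =>
          cast.toList.foldl (fun s letter => PySem.Set.add s letter) s) PySem.Set.empty
      imp.foldl (fun t i =>
        if answers.all (fun st => decide (i ∈ st.toList)) then t + 1 else t) t)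
    =
    (if answers.length = 1 then
      t + PySem.Str.len (PySem.List.pyGetD answers 0 "")
    else
      match answers with
      | [] => t
      | a0 :: rest =>
        let common : PySem.Set Char :=
          rest.foldl (fun c cast => PySem.Set.inter c (PySem.Set.ofList cast.toList))
            (PySem.Set.ofList a0.toList)
        t + PySem.Set.len common) := by
  by_cases hlen : answers.length = 1
  · simp [hlen]
  · simp only [hlen, if_false]
    match answers with
    | [] => simp [PySem.Set.empty]
    | a0 :: rest =>
      set p : Char → Bool := fun i => (a0 :: rest).all (fun st => decide (i ∈ st.toList)) with hp
      set imp := (a0 :: rest).foldl (fun s cast =>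
          cast.toList.foldl (fun s letter => PySem.Set.add s letter) s) PySem.Set.empty with himp
      set common := rest.foldl (fun c cast => PySem.Set.inter c (PySem.Set.ofList cast.toList))
            (PySem.Set.ofList a0.toList) with hcommon
      have hfc := fold_count p imp t
      rw [hfc]
      congr 1
      -- countP p imp = len common
      have hperm : (imp.filter p).Perm common := by
        apply (List.perm_ext_iff_of_nodup (List.Nodup.filter _ ?nd1) ?nd2).mpr
        case nd1 => exact nodup_union_fold _ _ (by simp [PySem.Set.empty])
        case nd2 => exact nodup_inter_fold _ _ (PySem.Set.nodup_ofList _)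
        intro y
        rw [List.mem_filter, mem_union_fold, mem_inter_fold]
        simp only [PySem.Set.mem_ofList, hp, List.all_eq_true, decide_eq_true_eq,
          PySem.Set.empty]
        constructor
        · rintro ⟨_, h⟩
          exact ⟨h a0 (by simp), fun cast hc => h cast (by simp [hc])⟩
        · rintro ⟨h0, h⟩
          refine ⟨Or.inr ⟨a0, by simp, h0⟩, ?_⟩
          intro st hst; rcases List.mem_cons.mp hst with rfl | hst
          · exact h0
          · exact h st hst
      have hlen2 : (List.filter p imp).length = common.length := hperm.length_eq
      rw [List.countP_eq_length_filter, hlen2]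
      rfl

theorem result_two_spec : Claim_equal_result_two := by
  intro pole _
  unfold Spec_result_two result_two result_two_alt
  congr 1
  funext t answers
  exact step_eq t answers
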